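-- pv_equiv track=rewrite | github.com/Shaier/practice_ml | eval_work.py | get_user_lines
-- ===== SOURCE A (Python) =====
-- def get_user_lines(all_lines):
--     """Strip the metadata header lines and return just the user's code."""
--     result = []
--     past_header = False
--     for line in all_lines:
--         stripped = line.strip()
--         if not past_header:
--             if (
--                 stripped.startswith("# source:")
--                 or stripped.startswith("# masked:")
--                 or stripped == ""
--             ):
--                 continue
--             else:
--                 past_header = True
--         result.append(line)
--     return result
-- ===== SOURCE B (Python) =====
-- def get_user_lines(all_lines):
--     """Strip the metadata header lines and return just the user's code."""
--     def is_header(line):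
--         s = line.strip()
--         return s.startswith("# source:") or s.startswith("# masked:") or s == ""
--     idx = next((i for i, line in enumerate(all_lines) if not is_header(line)), None)
--     return [] if idx is None else all_lines[idx:]
-- ===== Notes on version B (the rewrite author's own statement) =====
-- stated objective: simpler
-- what changed: B finds the index of the first non-header line and returns the tail slice in one shot, instead of A's flag-and-append accumulation loop.
import Mathlib
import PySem

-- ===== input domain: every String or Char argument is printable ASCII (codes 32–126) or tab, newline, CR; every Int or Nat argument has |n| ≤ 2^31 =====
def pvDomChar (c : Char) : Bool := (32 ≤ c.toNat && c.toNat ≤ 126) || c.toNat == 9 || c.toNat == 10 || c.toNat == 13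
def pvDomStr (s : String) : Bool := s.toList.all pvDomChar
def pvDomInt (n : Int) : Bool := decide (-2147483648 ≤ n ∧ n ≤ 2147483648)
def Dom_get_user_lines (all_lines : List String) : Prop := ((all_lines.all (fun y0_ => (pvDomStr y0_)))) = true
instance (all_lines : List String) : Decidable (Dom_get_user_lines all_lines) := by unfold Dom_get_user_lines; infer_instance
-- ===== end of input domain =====

-- B finds the first non-header line's index and returns the tail slice, instead of A's flag-and-append loop; objective: simpler.


-- ===== PORT A =====
-- one loop iteration of A: strip, test the header conditions in A's order, append when past the header
def pvStepA (st : List String × Bool) (line : String) : List String × Bool :=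
  let stripped := PySem.Str.strip line
  if !st.2 then
    if PySem.Str.startswith stripped "# source:" || PySem.Str.startswith stripped "# masked:" || stripped == "" then
      st
    else
      (st.1 ++ [line], true)
  else
    (st.1 ++ [line], st.2)

def get_user_lines (all_lines : List String) : List String :=
  (all_lines.foldl pvStepA ([], false)).1

-- ===== PORT B =====
def pvIsHeader (line : String) : Bool :=
  let s := PySem.Str.strip line
  PySem.Str.startswith s "# source:" || PySem.Str.startswith s "# masked:" || s == ""

def get_user_lines_alt (all_lines : List String) : List String :=
  match all_lines.findIdx? (fun line => !pvIsHeader line) with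
  | none => []
  | some i => all_lines.drop i

-- ===== PRECONDITION & SPEC =====
def Spec_get_user_lines (all_lines : List String) (out : List String) : Prop := out = get_user_lines_alt all_lines
instance (all_lines : List String) (out : List String) : Decidable (Spec_get_user_lines all_lines out) := by unfold Spec_get_user_lines; infer_instance

-- ===== CLAIM (what is proved, stated in full; the proofs are below) =====
def Claim_equal_get_user_lines : Prop := ∀ (all_lines : List String), Dom_get_user_lines all_lines → Spec_get_user_lines all_lines (get_user_lines all_lines)

-- ===== LEMMAS AND PROOFS =====

theorem pvStepA_true (acc : List String) (line : String) :
    pvStepA (acc, true) line = (acc ++ [line], true) := rfl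

theorem pvStepA_false (acc : List String) (line : String) :
    pvStepA (acc, false) line = if pvIsHeader line then (acc, false) else (acc ++ [line], true) := by
  unfold pvStepA pvIsHeader
  rfl

-- once past_header is true, A's loop just appends every remaining line
theorem pv_foldl_true (l : List String) (acc : List String) :
    l.foldl pvStepA (acc, true) = (acc ++ l, true) := by
  induction l generalizing acc with
  | nil => simp
  | cons h t ih => simp only [List.foldl_cons, pvStepA_true, ih]; simp

-- before the flag flips, A's loop computes acc ++ B's result on the remaining lines
theorem pv_foldl_false (l : List String) (acc : List String) :
    (l.foldl pvStepA (acc, false)).1 = acc ++ get_user_lines_alt l := by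
  induction l generalizing acc with
  | nil => simp [get_user_lines_alt]
  | cons h t ih =>
    simp only [List.foldl_cons, pvStepA_false]
    by_cases hh : pvIsHeader h = true
    · rw [if_pos hh, ih]
      simp only [get_user_lines_alt, List.findIdx?_cons, hh]
      cases hf : List.findIdx? (fun line => !pvIsHeader line) t with
      | none => simp
      | some i => simp
    · rw [if_neg hh, pv_foldl_true]
      have hh' : pvIsHeader h = false := by simpa using hh
      simp [get_user_lines_alt, List.findIdx?_cons, hh']

-- ===== VERDICT (by name: the statement is the Claim_ definition above) =====
theorem get_user_lines_spec : Claim_equal_get_user_lines := by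
  intro all_lines _
  unfold Spec_get_user_lines get_user_lines
  simpa using pv_foldl_false all_lines []
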